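-- pv_equiv track=rewrite | github.com/slidracoon72/leetcode | Solutions/PassingABooleanExpression.py | parseBoolExpr1
-- ===== SOURCE A (Python) =====
-- from collections import deque
--
-- def parseBoolExpr1(expression: str) -> bool:
--     st = deque()
--     operators = ["!", "&", "|"]
--     truth = ["f", "t"]
--     ignore = [",", "("]
--
--     for c in expression:
--         if c in ignore:
--             continue
--         if c in operators or c in truth:
--             st.append(c)
--         elif c == ")":
--             has_True = False
--             has_False = False
--             while st[-1] in truth:
--                 top_value = st.pop()
--                 if top_value == "t":
--                     has_True = True
--                 elif top_value == "f":
--                     has_False = True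
--
--             op = st.pop()
--             if op == "!":
--                 st.append("t" if not has_True else "f")
--             elif op == "&":
--                 st.append("f" if has_False else "t")
--             else:
--                 st.append("t" if has_True else "f")
--
--     return st[-1] == "t"
-- ===== SOURCE B (Python) =====
-- def parseBoolExpr1(expression: str) -> bool:
--     # Repeated innermost-group rewriting: keep only the characters the machine acts on,
--     # then repeatedly reduce the first ')' (with the value-run and operator before it)
--     # to a single 't'/'f' character until no ')' is left; answer = last remaining char.
--     tokens = [c for c in expression if c in "tf!&|)"]
--     while ")" in tokens:
--         i = tokens.index(")")
--         head = tokens[:i]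
--         vals = []
--         while head and head[-1] in "tf":
--             vals.append(head.pop())
--         op = head.pop()  # IndexError on a group with no operator, as in A
--         if op == "!":
--             res = "f" if "t" in vals else "t"
--         elif op == "&":
--             res = "f" if "f" in vals else "t"
--         else:
--             res = "t" if "t" in vals else "f"
--         tokens = head + [res] + tokens[i + 1:]
--     return tokens[-1] == "t"  # IndexError when nothing remains, as in A
-- ===== Notes on version B (the rewrite author's own statement) =====
-- stated objective: alternative
-- what changed: Replaces A's single left-to-right pass with a character deque (push every token, reduce on ')') by repeated rewriting: filter the string to its token characters once, then repeatedly locate the first ')' and splice that group's operator and value-run into a single 't'/'f' until no ')' remains, answering with the last remaining token.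
import Mathlib
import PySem

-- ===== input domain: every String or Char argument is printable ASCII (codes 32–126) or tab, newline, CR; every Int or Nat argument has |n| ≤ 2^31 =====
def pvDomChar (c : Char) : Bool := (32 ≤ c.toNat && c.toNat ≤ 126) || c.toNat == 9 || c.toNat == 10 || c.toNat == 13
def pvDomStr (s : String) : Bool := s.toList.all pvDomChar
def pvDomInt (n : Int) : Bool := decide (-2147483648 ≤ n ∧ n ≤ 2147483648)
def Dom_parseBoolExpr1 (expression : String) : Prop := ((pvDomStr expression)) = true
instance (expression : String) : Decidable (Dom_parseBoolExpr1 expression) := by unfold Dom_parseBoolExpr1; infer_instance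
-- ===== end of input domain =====

-- B replaces A's one-pass character stack machine by repeated rewriting of the first ')'-group
-- of the filtered token list; return values are proved equal on every input (total claim).

-- ===== PORT A =====
-- Python's deque is modelled as a List Char with the TOP at the HEAD (append = cons, pop = head).
-- The Option layer is `none` exactly where Python raises IndexError (st[-1] / st.pop() on empty).
-- the `while st[-1] in truth: top_value = st.pop(); ...` loop of A
def pvPopTruths : List Char → Bool → Bool → Option (Bool × Bool × List Char)
  | [], _, _ => none                     -- st[-1] on empty deque: IndexError
  | c :: rest, hT, hF =>
    if c = 't' ∨ c = 'f' then pvPopTruths rest (hT || (c = 't')) (hF || (c = 'f'))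
    else some (hT, hF, c :: rest)

-- one iteration of A's `for c in expression` loop
def pvStepA (st? : Option (List Char)) (c : Char) : Option (List Char) :=
  match st? with
  | none => none
  | some st =>
    if c = ',' ∨ c = '(' then some st
    else if (c = '!' ∨ c = '&' ∨ c = '|') ∨ (c = 'f' ∨ c = 't') then some (c :: st)
    else if c = ')' then
      match pvPopTruths st false false with
      | some (hT, hF, op :: rest') =>
          some ((if op = '!' then (if !hT then 't' else 'f')
                 else if op = '&' then (if hF then 'f' else 't')
                 else (if hT then 't' else 'f')) :: rest')
      | _ => none                        -- st.pop() of the operator on empty deque: IndexError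
    else some st                         -- any other character: loop body falls through

def parseBoolExpr1 (expression : String) : Bool :=
  match expression.toList.foldl pvStepA (some []) with
  | some (top :: _) => top == 't'
  | _ => false                           -- Python raises IndexError here

-- ===== PORT B =====
-- `[c for c in expression if c in "tf!&|)"]`
def pvTokGuard (c : Char) : Bool :=
  c = 't' || c = 'f' || c = '!' || c = '&' || c = '|' || c = ')'
def pvTokens (l : List Char) : List Char := l.filter pvTokGuard

-- Source B's `while head and head[-1] in "tf": vals.append(head.pop())`, with head passed REVERSED
-- (Python pops from the right end; the reversed remainder is returned in the same orientation)
def pvPopVals : List Char → List Char × List Char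
  | [] => ([], [])
  | c :: r =>
    if c = 't' ∨ c = 'f' then
      let (vals, rest) := pvPopVals r
      (c :: vals, rest)
    else ([], c :: r)

-- Source B's `while ")" in tokens` rewriting loop.  `tokens.index(")")` plus the two slices are the
-- span at the first ')'; `op = head.pop()` on an exhausted head is the IndexError case (none).
-- The fuel only bounds the iteration count (one ')' disappears per round, so length+1 is enough).
def pvReduce : Nat → List Char → Option (List Char)
  | 0, _ => none
  | fuel + 1, tokens =>
    match tokens.span (fun c => c != ')') with
    | (_, []) => some tokens             -- `")" in tokens` is false: loop exits
    | (head, _ :: tail) =>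
      match pvPopVals head.reverse with
      | (_, []) => none                  -- op = head.pop() on empty list: IndexError
      | (vals, op :: rheadRest) =>
        let res := if op = '!' then (if 't' ∈ vals then 'f' else 't')
                   else if op = '&' then (if 'f' ∈ vals then 'f' else 't')
                   else (if 't' ∈ vals then 't' else 'f')
        pvReduce fuel (rheadRest.reverse ++ res :: tail)   -- tokens = head + [res] + tokens[i+1:]

def parseBoolExpr1_alt (expression : String) : Bool :=
  match pvReduce (expression.toList.length + 1) (pvTokens expression.toList) with
  | some tokens =>
    match tokens.getLast? with           -- tokens[-1]
    | some c => c == 't'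
    | none => false                      -- tokens[-1] on the empty list: IndexError
  | none => false

-- ===== PRECONDITION & SPEC =====
-- Exactly the inputs on which Python A returns (no IndexError): the token list is nonempty and
-- every ')' is preceded by strictly more operator tokens than ')' tokens (each ')' consumes one
-- operator from the deque; it fails when none is left, and the final st[-1] fails only on an
-- empty deque).  The two ports in fact agree on every input (parseBoolExpr1_eq is unconditional).
def Pre_parseBoolExpr1 (expression : String) : Prop :=
  pvTokens expression.toList ≠ [] ∧
  ∀ i < (pvTokens expression.toList).length,
    (pvTokens expression.toList)[i]? = some ')' →
      ((pvTokens expression.toList).take i).count ')' <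
        ((pvTokens expression.toList).take i).countP (fun c => c = '!' || c = '&' || c = '|')
instance (expression : String) : Decidable (Pre_parseBoolExpr1 expression) := by
  unfold Pre_parseBoolExpr1; infer_instance

def pvWitness_parseBoolExpr1 : String := "&(t,!(f),|(f,t))"

def Spec_parseBoolExpr1 (expression : String) (out : Bool) : Prop := out = parseBoolExpr1_alt expression
instance (expression : String) (out : Bool) : Decidable (Spec_parseBoolExpr1 expression out) := by unfold Spec_parseBoolExpr1; infer_instance

-- ===== CLAIM (what is proved, stated in full; the proofs are below) =====
def Claim_equal_parseBoolExpr1 : Prop := ∀ (expression : String), Dom_parseBoolExpr1 expression → Pre_parseBoolExpr1 expression → Spec_parseBoolExpr1 expression (parseBoolExpr1 expression)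

-- ===== LEMMAS AND PROOFS =====

-- once A's machine has raised, it stays raised
theorem pvFoldl_none (l : List Char) : List.foldl pvStepA none l = none := by
  induction l with
  | nil => rfl
  | cons c r ih => simpa [pvStepA] using ih

-- characters outside the token alphabet leave A's machine state unchanged
theorem pvStep_skip (c : Char) (hg : pvTokGuard c = false) (st? : Option (List Char)) :
    pvStepA st? c = st? := by
  cases st? with
  | none => rfl
  | some st =>
    simp only [pvTokGuard, Bool.or_eq_false_iff, decide_eq_false_iff_not] at hg
    obtain ⟨⟨⟨⟨⟨h1, h2⟩, h3⟩, h4⟩, h5⟩, h6⟩ := hg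
    by_cases hi : c = ',' ∨ c = '(' <;>
      simp [pvStepA, hi, h1, h2, h3, h4, h5, h6]

-- token characters other than ')' are pushed
theorem pvStep_push (c : Char) (hg : pvTokGuard c = true) (hne : c ≠ ')')
    (st : List Char) : pvStepA (some st) c = some (c :: st) := by
  have h : c = 't' ∨ c = 'f' ∨ c = '!' ∨ c = '&' ∨ c = '|' := by
    simp only [pvTokGuard, Bool.or_eq_true, decide_eq_true_eq] at hg
    tauto
  rcases h with rfl | rfl | rfl | rfl | rfl <;> simp [pvStepA]

theorem pvFoldl_push (H : List Char) (hH : ∀ c ∈ H, pvTokGuard c = true ∧ c ≠ ')') :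
    ∀ st : List Char, List.foldl pvStepA (some st) H = some (H.reverse ++ st) := by
  induction H with
  | nil => intro st; simp
  | cons c r ih =>
    intro st
    have hc := hH c (by simp)
    rw [List.foldl_cons, pvStep_push c hc.1 hc.2,
      ih (fun x hx => hH x (by simp [hx])) (c :: st)]
    simp

-- A's truth-popping loop computes the flags of exactly the values B's pop loop collects
theorem pvPop_corr (l : List Char) : ∀ (hT hF : Bool) (vals rest : List Char),
    pvPopVals l = (vals, rest) →
    pvPopTruths l hT hF =
      (match rest with
       | [] => none
       | op :: r => some (hT || decide ('t' ∈ vals), hF || decide ('f' ∈ vals), op :: r)) := by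
  induction l with
  | nil =>
    intro hT hF vals rest h
    simp only [pvPopVals] at h
    injection h with h1 h2
    subst h1; subst h2
    simp [pvPopTruths]
  | cons c r ih =>
    intro hT hF vals rest h
    by_cases hc : c = 't' ∨ c = 'f'
    · obtain ⟨v', r', hpv⟩ : ∃ v' r', pvPopVals r = (v', r') := ⟨_, _, rfl⟩
      simp only [pvPopVals, if_pos hc, hpv] at h
      injection h with h1 h2
      subst h1; subst h2
      rcases hc with hc | hc <;> subst hc <;>
        · rw [pvPopTruths, if_pos (by simp), ih _ _ _ _ hpv]
          cases r' <;> simp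
    · simp only [pvPopVals, if_neg hc] at h
      injection h with h1 h2
      subst h1; subst h2
      rw [pvPopTruths, if_neg hc]
      simp

-- the elements B's pop loop leaves in the head all come from the head
theorem pvPopVals_rest_subset (l : List Char) : ∀ vals rest, pvPopVals l = (vals, rest) →
    ∀ c ∈ rest, c ∈ l := by
  induction l with
  | nil =>
    intro vals rest h
    simp only [pvPopVals] at h
    injection h with h1 h2
    subst h2
    intro c hc
    simp at hc
  | cons c r ih =>
    intro vals rest h
    by_cases hc : c = 't' ∨ c = 'f'
    · obtain ⟨v', r', hpv⟩ : ∃ v' r', pvPopVals r = (v', r') := ⟨_, _, rfl⟩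
      simp only [pvPopVals, if_pos hc, hpv] at h
      have hr : r' = rest := by simpa using congrArg Prod.snd h
      intro x hx
      exact List.mem_cons_of_mem c (ih _ _ hpv x (hr ▸ hx))
    · simp only [pvPopVals, if_neg hc] at h
      have hr : c :: r = rest := by simpa using congrArg Prod.snd h
      intro x hx
      exact hr ▸ hx

-- core correspondence: A's machine on a token list computes what B's rewriting loop leaves,
-- reversed (the stack top is the last remaining token); `none` on both raise points.
theorem pvMachine_reduce (fuel : Nat) : ∀ T : List Char,
    (∀ c ∈ T, pvTokGuard c = true) → T.count ')' < fuel →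
    List.foldl pvStepA (some []) T =
      (match pvReduce fuel T with
       | some T' => some T'.reverse
       | none => none) := by
  induction fuel with
  | zero => intro T _ h; omega
  | succ fuel ih =>
    intro T hT hcount
    have hsplit := List.takeWhile_append_dropWhile (p := fun c => c != ')') (l := T)
    cases hd : T.dropWhile (fun c => c != ')') with
    | nil =>
      -- no ')' left: the machine just pushes everything
      have hall : ∀ c ∈ T, (fun c => c != ')') c = true := List.dropWhile_eq_nil_iff.mp hd
      rw [pvFoldl_push T (fun c hc => ⟨hT c hc, by simpa using hall c hc⟩) []]
      simp only [pvReduce, List.span_eq_takeWhile_dropWhile, hd]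
      simp
    | cons x tail =>
      set head := T.takeWhile (fun c => c != ')') with hhead
      have hx : x = ')' := by
        have := List.head?_dropWhile_not (p := fun c => c != ')') (l := T)
        rw [hd] at this; simpa using this
      subst hx
      have hheadmem : ∀ c ∈ head, pvTokGuard c = true ∧ c ≠ ')' := by
        intro c hc
        have hcT : c ∈ T := (List.takeWhile_sublist _).subset hc
        have hp : (fun c => c != ')') c = true := by
          have := List.all_takeWhile (p := fun c => c != ')') (l := T)
          exact (List.all_eq_true.mp this) c hc
        exact ⟨hT c hcT, by simpa using hp⟩
      have htails : ∀ c ∈ tail, pvTokGuard c = true := by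
        intro c hc
        have : c ∈ T := by
          rw [← hsplit, hd]; exact List.mem_append_right _ (by simp [hc])
        exact hT c this
      -- machine: process head (pushes), then ')'
      have hfold : List.foldl pvStepA (some []) T =
          List.foldl pvStepA (pvStepA (some head.reverse) ')') tail := by
        conv_lhs => rw [← hsplit, hd]
        rw [List.foldl_append, pvFoldl_push head hheadmem []]
        simp
      obtain ⟨vals, rest2, hpv⟩ : ∃ v r, pvPopVals head.reverse = (v, r) := ⟨_, _, rfl⟩
      have hstep : pvStepA (some head.reverse) ')' =
          (match pvPopTruths head.reverse false false with
           | some (hT, hF, op :: rest') =>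
              some ((if op = '!' then (if !hT then 't' else 'f')
                     else if op = '&' then (if hF then 'f' else 't')
                     else (if hT then 't' else 'f')) :: rest')
           | _ => none) := by
        simp [pvStepA]
      rw [pvPop_corr head.reverse false false vals rest2 hpv] at hstep
      -- the reduction step of B, with the span resolved
      have hred : pvReduce (fuel + 1) T =
          (match pvPopVals head.reverse with
           | (_, []) => none
           | (vals, op :: rheadRest) =>
             pvReduce fuel (rheadRest.reverse ++
               (if op = '!' then (if 't' ∈ vals then 'f' else 't')
                else if op = '&' then (if 'f' ∈ vals then 'f' else 't')
                else (if 't' ∈ vals then 't' else 'f')) :: tail)) := by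
        simp only [pvReduce, List.span_eq_takeWhile_dropWhile, hd, ← hhead]
      cases rest2 with
      | nil =>
        -- A raises popping the operator; B raises popping the exhausted head
        rw [hfold, hstep]
        simp only [pvFoldl_none, hred, hpv]
      | cons op rr =>
        have hres : (if op = '!' then (if !(false || decide ('t' ∈ vals)) then 't' else 'f')
                     else if op = '&' then (if (false || decide ('f' ∈ vals)) then 'f' else 't')
                     else (if (false || decide ('t' ∈ vals)) then 't' else 'f')) =
                    (if op = '!' then (if 't' ∈ vals then 'f' else 't')
                     else if op = '&' then (if 'f' ∈ vals then 'f' else 't')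
                     else (if 't' ∈ vals then 't' else 'f')) := by
          by_cases h1 : 't' ∈ vals <;> by_cases h2 : 'f' ∈ vals <;> simp [h1, h2]
        set res := (if op = '!' then (if 't' ∈ vals then 'f' else 't')
                    else if op = '&' then (if 'f' ∈ vals then 'f' else 't')
                    else (if 't' ∈ vals then 't' else 'f')) with hresdef
        have hrr : ∀ c ∈ rr, pvTokGuard c = true ∧ c ≠ ')' := by
          intro c hc
          have : c ∈ head.reverse :=
            pvPopVals_rest_subset head.reverse vals (op :: rr) hpv c (by simp [hc])
          exact hheadmem c (by simpa using this)
      -- res is 't' or 'f': a token and not ')'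
        have hresg : pvTokGuard res = true ∧ res ≠ ')' := by
          rw [hresdef]; split_ifs <;> simp [pvTokGuard]
        -- machine after the ')' step = machine started on B's rewritten list
        have hnext : List.foldl pvStepA (some []) (rr.reverse ++ res :: tail) =
            List.foldl pvStepA (some (res :: rr)) tail := by
          rw [List.foldl_append, pvFoldl_push rr.reverse
            (fun c hc => hrr c (by simpa using hc)) []]
          simp only [List.append_nil, List.reverse_reverse, List.foldl_cons,
            pvStep_push res hresg.1 hresg.2]
        -- count of ')' drops by one
        have hcount' : (rr.reverse ++ res :: tail).count ')' < fuel := by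
          have h0 : rr.count ')' = 0 := List.count_eq_zero.mpr (fun hmem => (hrr _ hmem).2 rfl)
          have h1 : (rr.reverse ++ res :: tail).count ')' = tail.count ')' := by
            simp [List.count_append, h0, hresg.2]
          have h2 : T.count ')' = tail.count ')' + 1 := by
            have hc0 : head.count ')' = 0 :=
              List.count_eq_zero.mpr (fun hmem => (hheadmem _ hmem).2 rfl)
            conv_lhs => rw [← hsplit, hd]
            simp [List.count_append, hc0]
          omega
        have hguard' : ∀ c ∈ rr.reverse ++ res :: tail, pvTokGuard c = true := by
          intro c hc
          rcases List.mem_append.mp hc with hc | hc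
          · exact (hrr c (by simpa using hc)).1
          · rcases List.mem_cons.mp hc with rfl | hc
            · exact hresg.1
            · exact htails c hc
        rw [hfold, hstep]
        simp only [hres]
        rw [← hnext, ih _ hguard' hcount', hred, hpv]

theorem parseBoolExpr1_eq (expression : String) :
    parseBoolExpr1 expression = parseBoolExpr1_alt expression := by
  unfold parseBoolExpr1 parseBoolExpr1_alt
  -- A's machine ignores every character outside the token alphabet
  have hfilter : ∀ (l : List Char) (st? : Option (List Char)),
      List.foldl pvStepA st? l = List.foldl pvStepA st? (pvTokens l) := by
    intro l
    induction l with
    | nil => intro st?; rfl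
    | cons c r ih =>
      intro st?
      cases hg : pvTokGuard c with
      | true => simp only [pvTokens, List.filter_cons, hg, if_true, List.foldl_cons]; exact ih _
      | false =>
        simp only [pvTokens, List.filter_cons, hg, List.foldl_cons, pvStep_skip c hg st?]
        exact ih st?
  rw [hfilter]
  have hguard : ∀ c ∈ pvTokens expression.toList, pvTokGuard c = true :=
    fun c hc => (List.mem_filter.mp hc).2
  have hcount : (pvTokens expression.toList).count ')' < expression.toList.length + 1 := by
    have h1 : (pvTokens expression.toList).count ')' ≤ (pvTokens expression.toList).length :=
      List.count_le_length
    have h2 : (pvTokens expression.toList).length ≤ expression.toList.length :=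
      List.length_filter_le ..
    omega
  rw [pvMachine_reduce (expression.toList.length + 1) _ hguard hcount]
  cases hred : pvReduce (expression.toList.length + 1) (pvTokens expression.toList) with
  | none => rfl
  | some T' =>
    cases hrev : T'.reverse with
    | nil =>
      have hl : T'.getLast? = none := by rw [← List.head?_reverse, hrev]; rfl
      simp [hrev, hl]
    | cons c r =>
      have hl : T'.getLast? = some c := by rw [← List.head?_reverse, hrev]; rfl
      simp [hrev, hl]

-- ===== VERDICT (by name: the statement is the Claim_ definition above) =====
theorem parseBoolExpr1_spec : Claim_equal_parseBoolExpr1 := by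
  intro e _ _
  unfold Spec_parseBoolExpr1
  exact parseBoolExpr1_eq e
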